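-- pv_equiv track=rewrite | github.com/karina270398-png/embeddings-v1 | src/service_index.py | rollup_code_2digit
-- ===== SOURCE A (Python) =====
-- from typing import List, Tuple, Union, Optional
--
-- def rollup_code_2digit(code: str) -> Optional[str]:
--     # Extract leading digits, take first two
--     num = []
--     for ch in code:
--         if ch.isdigit():
--             num.append(ch)
--         elif ch == ".":
--             break
--         else:
--             break
--     if not num:
--         return None
--     return ("".join(num))[:2] if len(num) >= 2 else "".join(num)
-- ===== SOURCE B (Python) =====
-- from typing import Optional
--
-- def rollup_code_2digit(code: str) -> Optional[str]:
--     # Closed form: only the first two characters can matter.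
--     if not code or not code[0].isdigit():
--         return None
--     if len(code) >= 2 and code[1].isdigit():
--         return code[:2]
--     return code[0]
-- ===== Notes on version B (the rewrite author's own statement) =====
-- stated objective: simpler
-- what changed: Replaces the accumulate-digits loop plus join/slice with a direct closed-form check of the first two characters.
import Mathlib
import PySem

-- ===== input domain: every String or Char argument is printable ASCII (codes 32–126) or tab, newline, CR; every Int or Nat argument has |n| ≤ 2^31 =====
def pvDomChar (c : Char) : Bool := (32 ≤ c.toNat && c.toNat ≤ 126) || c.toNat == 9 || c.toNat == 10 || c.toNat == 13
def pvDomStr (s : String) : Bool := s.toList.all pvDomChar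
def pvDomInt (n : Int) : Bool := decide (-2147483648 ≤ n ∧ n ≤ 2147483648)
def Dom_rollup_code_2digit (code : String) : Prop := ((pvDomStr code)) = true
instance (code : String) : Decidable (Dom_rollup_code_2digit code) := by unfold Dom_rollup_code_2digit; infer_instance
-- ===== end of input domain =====

-- B replaces A's accumulate-leading-digits loop with a closed-form check of the first two characters (objective: simpler).


-- ===== PORT A =====
-- the for-loop over code with its three branches (append / break on '.' / break otherwise), accumulator style
def rollupA_loop : List Char → List Char → List Char
  | [], num => num
  | ch :: rest, num =>
    if PySem.Chars.isdigit ch then rollupA_loop rest (num ++ [ch])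
    else if ch = '.' then num
    else num

def rollup_code_2digit (code : String) : Option String :=
  let num := rollupA_loop code.toList []
  if num = [] then none
  else if 2 ≤ num.length then some (String.ofList (num.take 2)) else some (String.ofList num)

-- ===== PORT B =====
def rollup_code_2digit_alt (code : String) : Option String :=
  match code.toList with
  | [] => none
  | c :: rest =>
    if PySem.Chars.isdigit c then
      match rest with
      | d :: _ => if PySem.Chars.isdigit d then some (String.ofList [c, d]) else some (String.ofList [c])
      | [] => some (String.ofList [c])
    else none

-- ===== PRECONDITION & SPEC =====
def Spec_rollup_code_2digit (code : String) (out : Option String) : Prop := out = rollup_code_2digit_alt code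
instance (code : String) (out : Option String) : Decidable (Spec_rollup_code_2digit code out) := by unfold Spec_rollup_code_2digit; infer_instance

-- ===== CLAIM (what is proved, stated in full; the proofs are below) =====
def Claim_equal_rollup_code_2digit : Prop := ∀ (code : String), Dom_rollup_code_2digit code → Spec_rollup_code_2digit code (rollup_code_2digit code)

-- ===== LEMMAS AND PROOFS =====
theorem rollupA_loop_acc (l acc : List Char) : rollupA_loop l acc = acc ++ rollupA_loop l [] := by
  induction l generalizing acc with
  | nil => simp [rollupA_loop]
  | cons c rest ih =>
    simp only [rollupA_loop]
    split_ifs with h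
    · rw [show ([] : List Char) ++ [c] = [c] from rfl, ih (acc ++ [c]), ih [c], List.append_assoc]
    all_goals simp

-- ===== VERDICT (by name: the statement is the Claim_ definition above) =====
theorem rollup_code_2digit_spec : Claim_equal_rollup_code_2digit := by
  intro code _
  unfold Spec_rollup_code_2digit rollup_code_2digit rollup_code_2digit_alt
  match h : code.toList with
  | [] => simp [rollupA_loop]
  | [c] =>
    by_cases hc : PySem.Chars.isdigit c <;>
      simp [rollupA_loop, hc]
  | c :: d :: rest =>
    by_cases hc : PySem.Chars.isdigit c
    · by_cases hd : PySem.Chars.isdigit d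
      · simp only [rollupA_loop, hc, hd, if_true, List.nil_append, List.singleton_append]
        rw [rollupA_loop_acc rest [c, d]]
        simp
      · have hp : PySem.Chars.isdigit '.' = false := by decide
        by_cases hdot : d = '.' <;>
          simp [rollupA_loop, hc, hd, hdot, hp]
    · have hp : PySem.Chars.isdigit '.' = false := by decide
      by_cases hdot : c = '.' <;>
        simp [rollupA_loop, hc, hdot, hp]
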